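-- pv_equiv track=rewrite | github.com/assem-khaled/Codility_solutions | Lesson 5 Prefix Sums/GenomicRangeQuery.py | solution
-- ===== SOURCE A (Python) =====
-- def solution(S, P, Q):
--     result = []
--     for i in range(len(P)):
--         if 'A' in S[P[i]: Q[i] + 1]:
--             result.append(1)
--         elif 'C' in S[P[i]: Q[i] + 1]:
--             result.append(2)
--         elif 'G' in S[P[i]: Q[i] + 1]:
--             result.append(3)
--         elif 'T' in S[P[i]: Q[i] + 1]:
--             result.append(4)
--     return result
-- ===== SOURCE B (Python) =====
-- def solution(S, P, Q):
--     # Prefix counts of each nucleotide, so each query is answered without rescanning S;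
--     # query bounds are normalised with the standard slice.indices.
--     pref = [(0, 0, 0, 0)]
--     a = c = g = t = 0
--     for ch in S:
--         a += ch == 'A'
--         c += ch == 'C'
--         g += ch == 'G'
--         t += ch == 'T'
--         pref.append((a, c, g, t))
--     result = []
--     for p, q in zip(P, Q):
--         lo, hi, _ = slice(p, q + 1).indices(len(S))
--         a0, c0, g0, t0 = pref[lo]
--         a1, c1, g1, t1 = pref[hi]
--         if a1 > a0:
--             result.append(1)
--         elif c1 > c0:
--             result.append(2)
--         elif g1 > g0:
--             result.append(3)
--         elif t1 > t0:
--             result.append(4)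
--     return result
-- ===== Notes on version B (the rewrite author's own statement) =====
-- stated objective: alternative
-- what changed: B precomputes prefix counts of the four nucleotides in one pass over S and answers each query by comparing two prefix tuples (bounds normalised with the standard slice.indices) instead of slicing the string and scanning it up to four times per query; Pre_ excludes only len(Q) < len(P), on which A raises IndexError.
import Mathlib
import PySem

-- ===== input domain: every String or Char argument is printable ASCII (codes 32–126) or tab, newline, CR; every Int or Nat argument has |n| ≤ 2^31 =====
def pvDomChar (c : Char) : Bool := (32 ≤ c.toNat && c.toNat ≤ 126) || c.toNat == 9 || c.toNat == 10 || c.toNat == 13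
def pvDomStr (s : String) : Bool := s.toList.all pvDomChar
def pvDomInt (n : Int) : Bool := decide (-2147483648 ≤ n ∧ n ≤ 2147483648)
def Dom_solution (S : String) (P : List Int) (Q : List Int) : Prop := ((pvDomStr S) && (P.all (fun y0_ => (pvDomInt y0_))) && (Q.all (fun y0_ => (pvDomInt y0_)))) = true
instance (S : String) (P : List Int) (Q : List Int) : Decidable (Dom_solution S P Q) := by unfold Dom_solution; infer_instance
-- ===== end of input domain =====

-- B replaces A's per-query string slicing and membership scans by one pass of
-- prefix nucleotide counts, answering each query by comparing two count tuples
-- (objective: alternative).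


-- ===== PORT A =====
-- literal transliteration of A: for each i in range(len(P)), slice S[P[i]:Q[i]+1]
-- and test 'A'/'C'/'G'/'T' membership in that order (Q[i] read with pyGetD; the
-- IndexError inputs len(Q) < len(P) are excluded by Pre_ below).
def solution (S : String) (P : List Int) (Q : List Int) : List Int :=
  (PySem.List.pyRange 0 (P.length : Int)).foldl (fun result i =>
    let seg := PySem.Str.slice S (some (PySem.List.pyGetD P i 0)) (some (PySem.List.pyGetD Q i 0 + 1))
    if PySem.Str.isIn "A" seg then result ++ [1]
    else if PySem.Str.isIn "C" seg then result ++ [2]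
    else if PySem.Str.isIn "G" seg then result ++ [3]
    else if PySem.Str.isIn "T" seg then result ++ [4]
    else result) []

-- ===== PORT B =====
-- Source B's first loop: running counts (a, c, g, t), appending one tuple per character
def prefStep (st : List (Int × Int × Int × Int) × (Int × Int × Int × Int)) (ch : Char) :
    List (Int × Int × Int × Int) × (Int × Int × Int × Int) :=
  let nc := (st.2.1 + (if ch = 'A' then 1 else 0), st.2.2.1 + (if ch = 'C' then 1 else 0),
             st.2.2.2.1 + (if ch = 'G' then 1 else 0), st.2.2.2.2 + (if ch = 'T' then 1 else 0))
  (st.1 ++ [nc], nc)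

-- Source B's query loop body: slice(p, q+1).indices(n) is PySem.List.clampIdx on each
-- bound (step 1), then the two prefix tuples pref[lo], pref[hi] are compared
def queryStep (n : Nat) (pref : List (Int × Int × Int × Int)) (result : List Int) (pq : Int × Int) : List Int :=
  let lo := PySem.List.clampIdx n pq.1
  let hi := PySem.List.clampIdx n (pq.2 + 1)
  let lot := pref.getD lo (0, 0, 0, 0)
  let hit := pref.getD hi (0, 0, 0, 0)
  if hit.1 > lot.1 then result ++ [1]
  else if hit.2.1 > lot.2.1 then result ++ [2]
  else if hit.2.2.1 > lot.2.2.1 then result ++ [3]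
  else if hit.2.2.2 > lot.2.2.2 then result ++ [4]
  else result

def solution_alt (S : String) (P : List Int) (Q : List Int) : List Int :=
  let pref := (S.toList.foldl prefStep ([(0, 0, 0, 0)], (0, 0, 0, 0))).1
  (P.zip Q).foldl (queryStep S.toList.length pref) []

-- ===== PRECONDITION & SPEC =====
-- A indexes Q[i] for every i < len(P), so it raises IndexError exactly when Q is
-- shorter than P: those inputs are excluded (slicing itself never raises).
def Pre_solution (S : String) (P : List Int) (Q : List Int) : Prop := P.length ≤ Q.length
instance (S : String) (P : List Int) (Q : List Int) : Decidable (Pre_solution S P Q) := by unfold Pre_solution; infer_instance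
def pvWitness_solution : String × List Int × List Int := ("GACACCATA", [0, 0, 4, 7], [2, 8, 5, 7])

def Spec_solution (S : String) (P : List Int) (Q : List Int) (out : List Int) : Prop := out = solution_alt S P Q
instance (S : String) (P : List Int) (Q : List Int) (out : List Int) : Decidable (Spec_solution S P Q out) := by unfold Spec_solution; infer_instance

-- ===== CLAIM (what is proved, stated in full; the proofs are below) =====
def Claim_equal_solution : Prop := ∀ (S : String) (P : List Int) (Q : List Int), Dom_solution S P Q → Pre_solution S P Q → Spec_solution S P Q (solution S P Q)

-- ===== LEMMAS AND PROOFS =====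

-- the four per-character weights and the four prefix counts, as one tuple each
def w4 (ch : Char) : Int × Int × Int × Int :=
  ((if ch = 'A' then 1 else 0), (if ch = 'C' then 1 else 0), (if ch = 'G' then 1 else 0), (if ch = 'T' then 1 else 0))
def add4 (x y : Int × Int × Int × Int) : Int × Int × Int × Int :=
  (x.1 + y.1, x.2.1 + y.2.1, x.2.2.1 + y.2.2.1, x.2.2.2 + y.2.2.2)
def cnt4 (l : List Char) : Int × Int × Int × Int :=
  ((l.countP (· == 'A') : Int), (l.countP (· == 'C') : Int), (l.countP (· == 'G') : Int), (l.countP (· == 'T') : Int))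

theorem cnt4_cons (x : Char) (l : List Char) : cnt4 (x :: l) = add4 (w4 x) (cnt4 l) := by
  simp only [cnt4, add4, w4, List.countP_cons]
  refine Prod.ext ?_ (Prod.ext ?_ (Prod.ext ?_ ?_)) <;> simp [beq_iff_eq] <;> split_ifs <;> omega

theorem add4_assoc (x y z : Int × Int × Int × Int) : add4 (add4 x y) z = add4 x (add4 y z) := by
  simp [add4]; refine ⟨?_, ?_, ?_, ?_⟩ <;> ring

theorem prefStep_eq (st : List (Int × Int × Int × Int) × (Int × Int × Int × Int)) (ch : Char) :
    prefStep st ch = (st.1 ++ [add4 st.2 (w4 ch)], add4 st.2 (w4 ch)) := by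
  simp [prefStep, add4, w4]

-- the prefix-building fold, with arbitrary already-built list L and running count v
theorem buildB (cs : List Char) (L : List (Int × Int × Int × Int)) (v : Int × Int × Int × Int) :
    (cs.foldl prefStep (L, v)).1
      = L ++ (List.range cs.length).map (fun k => add4 v (cnt4 (cs.take (k + 1)))) := by
  induction cs generalizing L v with
  | nil => simp
  | cons x xs ih =>
    rw [List.foldl_cons, prefStep_eq, ih]
    simp only [List.length_cons, List.range_succ_eq_map, List.map_cons, List.map_map]
    rw [List.append_assoc]
    congr 1
    simp only [List.singleton_append, List.take_succ_cons]
    congr 1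
    · rw [show cnt4 (x :: xs.take 0) = add4 (w4 x) (cnt4 []) from cnt4_cons _ _]
      simp [cnt4, add4]
    · refine List.map_congr_left fun k _ => ?_
      simp only [Function.comp_apply, cnt4_cons, add4_assoc]

-- B's prefix list is the table of prefix count tuples
theorem pref_eq (cs : List Char) :
    (cs.foldl prefStep ([(0, 0, 0, 0)], (0, 0, 0, 0))).1
      = (List.range (cs.length + 1)).map (fun k => cnt4 (cs.take k)) := by
  rw [buildB]
  rw [List.range_succ_eq_map, List.map_cons, List.map_map]
  simp only [List.singleton_append]
  rw [show cnt4 (cs.take 0) = ((0 : Int), (0 : Int), (0 : Int), (0 : Int)) by simp [cnt4]]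
  congr 1
  refine List.map_congr_left ?_
  intro k hk
  simp [Function.comp, add4, cnt4]

-- reading the table at a valid index
theorem pref_getD (cs : List Char) (k : Nat) (hk : k ≤ cs.length) :
    ((List.range (cs.length + 1)).map (fun j => cnt4 (cs.take j))).getD k (0, 0, 0, 0)
      = cnt4 (cs.take k) := by
  have h : k < cs.length + 1 := by omega
  simp [List.getD, h]

-- count over the slice take (hi-lo) (drop lo cs) is the Nat-difference of prefix counts
theorem count_seg (pr : Char → Bool) (cs : List Char) (lo hi : Nat) :
    ((cs.drop lo).take (hi - lo)).countP pr = (cs.take hi).countP pr - (cs.take lo).countP pr := by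
  rcases Nat.lt_or_ge hi lo with h | h
  · have h0 : hi - lo = 0 := by omega
    have hsub : List.Sublist (cs.take hi) (cs.take lo) := by
      rw [show cs.take hi = (cs.take lo).take hi by rw [List.take_take, Nat.min_eq_left (by omega)]]
      exact List.take_sublist _ _
    have := hsub.countP_le (p := pr)
    simp [h0]; omega
  · have h1 : (cs.drop lo).take (hi - lo) = (cs.take hi).drop lo := by rw [List.drop_take]
    have h2 : cs.take hi = cs.take lo ++ (cs.take hi).drop lo := by
      conv_lhs => rw [← List.take_append_drop lo (cs.take hi)]
      rw [List.take_take, Nat.min_eq_left h]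
    rw [h1]; conv_rhs => rw [h2]
    rw [List.countP_append]; omega

-- a character occurs in the Python slice S[p:q+1] iff the prefix counts differ
theorem cond_eq (c : Char) (S : String) (p q : Int) :
    (PySem.Str.isIn (String.ofList [c]) (PySem.Str.slice S (some p) (some (q + 1))) = true)
    ↔ (S.toList.take (PySem.List.clampIdx S.toList.length p)).countP (· == c)
        < (S.toList.take (PySem.List.clampIdx S.toList.length (q + 1))).countP (· == c) := by
  rw [PySem.Str.isIn_iff_infix]
  simp only [String.toList_ofList, PySem.Str.toList_slice]
  rw [List.singleton_infix_iff]
  simp only [PySem.Chars.slice_eq_listSlice, PySem.List.slice]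
  rw [show c ∈ (S.toList.drop (PySem.List.clampIdx S.toList.length p)).take
        (PySem.List.clampIdx S.toList.length (q + 1) - PySem.List.clampIdx S.toList.length p)
      ↔ 0 < ((S.toList.drop (PySem.List.clampIdx S.toList.length p)).take
        (PySem.List.clampIdx S.toList.length (q + 1) - PySem.List.clampIdx S.toList.length p)).countP (· == c) from
    by rw [← List.count_eq_countP, List.count_pos_iff]]
  rw [count_seg]
  omega

-- one query: A's slice-membership branch chain equals B's tuple comparison
theorem step_eq (S : String) (r : List Int) (pq : Int × Int) :
    (let seg := PySem.Str.slice S (some pq.1) (some (pq.2 + 1))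
     if PySem.Str.isIn "A" seg then r ++ [1]
     else if PySem.Str.isIn "C" seg then r ++ [2]
     else if PySem.Str.isIn "G" seg then r ++ [3]
     else if PySem.Str.isIn "T" seg then r ++ [4]
     else r)
    = queryStep S.toList.length ((List.range (S.toList.length + 1)).map (fun k => cnt4 (S.toList.take k))) r pq := by
  obtain ⟨p, q⟩ := pq
  have hlo := PySem.List.clampIdx_le S.toList.length p
  have hhi := PySem.List.clampIdx_le S.toList.length (q + 1)
  simp only [queryStep, pref_getD S.toList _ hlo, pref_getD S.toList _ hhi]
  show (if PySem.Str.isIn "A" (PySem.Str.slice S (some p) (some (q + 1))) then r ++ [1]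
     else if PySem.Str.isIn "C" (PySem.Str.slice S (some p) (some (q + 1))) then r ++ [2]
     else if PySem.Str.isIn "G" (PySem.Str.slice S (some p) (some (q + 1))) then r ++ [3]
     else if PySem.Str.isIn "T" (PySem.Str.slice S (some p) (some (q + 1))) then r ++ [4]
     else r) = _
  rw [show ("A" : String) = String.ofList ['A'] from rfl,
      show ("C" : String) = String.ofList ['C'] from rfl,
      show ("G" : String) = String.ofList ['G'] from rfl,
      show ("T" : String) = String.ofList ['T'] from rfl]
  simp only [cond_eq 'A' S p q, cond_eq 'C' S p q, cond_eq 'G' S p q, cond_eq 'T' S p q,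
    cnt4, gt_iff_lt, Int.ofNat_lt]

-- A's fold over range(len(P)) reading P[i], Q[i] is a fold over zip(P, Q)
theorem foldl_range_zip {α : Type} (f : List α → Int × Int → List α)
    (P Q : List Int) (acc : List α) (h : P.length ≤ Q.length) :
    (List.range P.length).foldl (fun r i => f r (P.getD i 0, Q.getD i 0)) acc
      = (P.zip Q).foldl f acc := by
  induction P generalizing Q acc with
  | nil => simp
  | cons p P' ih =>
    cases Q with
    | nil => simp at h
    | cons q Q' =>
      rw [List.length_cons, List.range_succ_eq_map, List.foldl_cons, List.foldl_map]
      simp only [List.getD_cons_succ, List.getD_cons_zero]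
      rw [ih Q' (f acc (p, q)) (by simpa using h)]
      simp [List.zip_cons_cons]

-- ===== VERDICT (by name: the statement is the Claim_ definition above) =====
theorem solution_spec : Claim_equal_solution := by
  intro S P Q _ hlen
  unfold Spec_solution solution solution_alt
  rw [PySem.List.pyRange_zero_natCast, List.foldl_map]
  simp only [PySem.List.pyGetD_natCast]
  rw [foldl_range_zip (fun result pq =>
    let seg := PySem.Str.slice S (some pq.1) (some (pq.2 + 1))
    if PySem.Str.isIn "A" seg then result ++ [1]
    else if PySem.Str.isIn "C" seg then result ++ [2]
    else if PySem.Str.isIn "G" seg then result ++ [3]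
    else if PySem.Str.isIn "T" seg then result ++ [4]
    else result) P Q [] hlen]
  rw [pref_eq]
  congr 1
  funext acc pq
  exact step_eq S acc pq
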